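-- pv_equiv track=rewrite | github.com/emidan19/deep-tempest | python/TMDS_image_source.py | TMDS_pixel_cntdiff
-- ===== SOURCE A (Python) =====
-- def uint8_to_binarray(integer):
--   """Convert integer into fixed-length 8-bit binary array. LSB in [0].
--   Extended and modified code from https://github.com/projf/display_controller/blob/master/model/tmds.py
--   """
--
--   b_array = [int(i) for i in reversed(bin(integer)[2:])]
--   b_array += [0]*(8-len(b_array))
--   return b_array
--
-- def binarray_to_uint(binarray):
--
--   array = binarray[::-1]
--   num = array[0]
--   for n in range(1,len(binarray)):
--     num = (num << 1) + array[n]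
--
--   return num
--
-- def TMDS_pixel_cntdiff (pix,cnt=0):
--   """8bit pixel TMDS coding
--
--   Inputs:
--   - pix: 8-bit pixel
--   - cnt: 0's and 1's balance. Default in 0 (balanced)
--
--   Outputs:
--   - pix_out: TDMS coded 16-bit pixel (only 10 useful)
--   - cntdiff: balance difference given by the actual coded pixel
--
--   """
--   # Convert 8-bit pixel to binary list D
--   D = uint8_to_binarray(pix)
--
--   # Initialize output q
--   qm = [D[0]]
--
--   # 1's unbalanced condition at current pixelo
--   N1_D = D.count(1)
--
--   if N1_D>4 or (N1_D==4 and not(D[0])):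
--
--     # XNOR of consecutive bits
--     for k in range(1,8):
--       qm.append( not(qm[k-1] ^ D[k]) )
--     qm.append(0)
--
--   else:
--     # XOR of consecutive bits
--     for k in range(1,8):
--       qm.append( qm[k-1] ^ D[k] )
--     qm.append(1)
--
--   # Initialize output qout
--   qout = qm.copy()
--
--   # Unbalanced condition with previous and current pixels
--   N1_qm = qm[:8].count(1)
--   N0_qm = 8 - N1_qm
--
--   if cnt==0 or N1_qm==4:
--
--     qout.append(not(qm[8]))
--     qout[:8]=qm[:8] if qm[8] else [not(val) for val in qm[:8]]
--
--     if not(qm[8]):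
--       cnt_diff = N0_qm - N1_qm
--     else:
--       cnt_diff = N1_qm - N0_qm
--
--   else:
--
--     if (cnt>0 and N1_qm>4) or (cnt<0 and N1_qm<4):
--       qout.append(1)
--       qout[:8] = [not(val) for val in qm[:8]]
--       cnt_diff = 2*qm[8] +N0_qm -N1_qm
--     else:
--       qout.append(0)
--       cnt_diff = -2*(not(qm[8])) + N1_qm - N0_qm
--
--   # Return the TMDS coded pixel as uint and 0's y 1's balance difference
--   uint_out = binarray_to_uint(qout)
--   return uint_out, cnt_diff
-- ===== SOURCE B (Python) =====
-- def TMDS_pixel_cntdiff(pix, cnt=0):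
--   """8bit pixel TMDS coding -- closed-form bitwise reimplementation (no bit lists)."""
--   # number of 1s over ALL bits of pix, summed off the binary string as A does
--   # (so a negative pix raises ValueError here exactly as in A)
--   N1_D = sum(int(c) for c in bin(pix)[2:])
--
--   # cumulative XOR parity of the low 8 bits (qm[k] = d0 ^ ... ^ dk), via xor-shift folding
--   x = pix & 0xFF
--   x ^= (x << 1) & 0xFF
--   x ^= (x << 2) & 0xFF
--   x ^= (x << 4) & 0xFF
--
--   if N1_D > 4 or (N1_D == 4 and not (pix & 1)):
--     # XNOR chain = XOR chain with bits 1,3,5,7 flipped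
--     qm8 = 0
--     qm = x ^ 0xAA
--   else:
--     qm8 = 1
--     qm = x
--
--   N1_qm = bin(qm).count('1')
--   N0_qm = 8 - N1_qm
--
--   if cnt == 0 or N1_qm == 4:
--     out9 = 1 - qm8
--     low = qm if qm8 else qm ^ 0xFF
--     cnt_diff = (N1_qm - N0_qm) if qm8 else (N0_qm - N1_qm)
--   elif (cnt > 0 and N1_qm > 4) or (cnt < 0 and N1_qm < 4):
--     out9 = 1
--     low = qm ^ 0xFF
--     cnt_diff = 2 * qm8 + N0_qm - N1_qm
--   else:
--     out9 = 0
--     low = qm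
--     cnt_diff = -2 * (1 - qm8) + N1_qm - N0_qm
--
--   return low | (qm8 << 8) | (out9 << 9), cnt_diff
-- ===== Notes on version B (the rewrite author's own statement) =====
-- stated objective: simpler
-- what changed: Replaces the bit-array helpers entirely: the transition-minimized byte is computed as a closed-form cumulative-XOR parity via three xor-shift folds on the masked integer (XNOR chain = that value XOR 0xAA), the 1-counts off bin(), and the 10-bit output is assembled with shifts and OR instead of list appends, slice assignment and binarray_to_uint.
import Mathlib
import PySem

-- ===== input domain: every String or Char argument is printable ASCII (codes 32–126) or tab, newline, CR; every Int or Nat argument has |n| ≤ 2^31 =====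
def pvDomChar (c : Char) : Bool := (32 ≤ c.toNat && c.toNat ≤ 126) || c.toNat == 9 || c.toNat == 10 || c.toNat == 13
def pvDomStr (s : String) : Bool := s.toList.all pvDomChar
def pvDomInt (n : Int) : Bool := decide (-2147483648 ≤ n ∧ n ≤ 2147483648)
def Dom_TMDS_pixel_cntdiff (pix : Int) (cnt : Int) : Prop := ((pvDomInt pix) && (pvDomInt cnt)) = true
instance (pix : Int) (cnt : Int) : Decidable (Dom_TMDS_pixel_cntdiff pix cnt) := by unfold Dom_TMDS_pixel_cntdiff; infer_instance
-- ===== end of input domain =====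

-- B re-implements the TMDS encoder with closed-form bitwise arithmetic (xor-shift prefix
-- parity, popcount, shift/or assembly) instead of A's bit-list loops; objective: simpler.

-- ===== PORT A =====

-- bin(n)[2:] reversed (LSB first), as 0/1 ints, for n ≥ 0; fuel-structural so the kernel evaluates it
def pvBits (fuel : Nat) (n : Nat) : List Int :=
  match fuel with
  | 0 => []
  | f + 1 => if n = 0 then [] else ((n % 2 : Nat) : Int) :: pvBits f (n / 2)

def uint8_to_binarray (integer : Int) : List Int :=
  -- b_array = [int(i) for i in reversed(bin(integer)[2:])]  (exact for integer ≥ 0, i.e. on Pre_)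
  let b := if integer.toNat = 0 then [0] else pvBits integer.toNat integer.toNat
  -- b_array += [0]*(8-len(b_array))   (Nat subtraction clamps like Python's empty repeat)
  b ++ List.replicate (8 - b.length) 0

def binarray_to_uint (binarray : List Int) : Int :=
  -- array = binarray[::-1]   (step -1 ≠ 0, so slice? is always some)
  let array := (PySem.List.slice? binarray none none (-1)).getD []
  let num := PySem.List.pyGetD array 0 0
  (PySem.List.pyRange 1 (PySem.List.len binarray) 1).foldl
    (fun num n => (num <<< 1) + PySem.List.pyGetD array n 0) num

-- the XNOR loop: qm = [D[0]]; for k in range(1,8): qm.append(not(qm[k-1] ^ D[k]))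
-- (all values are 0/1 ints, so Python's not(x) is 1 - x)
def qmXnorA (D : List Int) : List Int :=
  (PySem.List.pyRange 1 8 1).foldl
    (fun qm k => qm ++ [1 - PySem.Int.bxor (PySem.List.pyGetD qm (k - 1) 0) (PySem.List.pyGetD D k 0)])
    [PySem.List.pyGetD D 0 0]

-- the XOR loop: qm = [D[0]]; for k in range(1,8): qm.append(qm[k-1] ^ D[k])
def qmXorA (D : List Int) : List Int :=
  (PySem.List.pyRange 1 8 1).foldl
    (fun qm k => qm ++ [PySem.Int.bxor (PySem.List.pyGetD qm (k - 1) 0) (PySem.List.pyGetD D k 0)])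
    [PySem.List.pyGetD D 0 0]

def TMDS_pixel_cntdiff (pix : Int) (cnt : Int) : Int × Int :=
  let D := uint8_to_binarray pix
  let N1_D := D.count 1
  let qm :=
    if N1_D > 4 ∨ (N1_D = 4 ∧ PySem.List.pyGetD D 0 0 = 0) then qmXnorA D ++ [0]
    else qmXorA D ++ [1]
  let N1_qm : Int := ((PySem.List.slice qm none (some 8)).count 1 : Nat)
  let N0_qm : Int := 8 - N1_qm
  if cnt = 0 ∨ N1_qm = 4 then
    let qm8 := PySem.List.pyGetD qm 8 0
    -- qout.append(not qm[8]); qout[:8] = qm[:8] if qm[8] else [not v for v in qm[:8]]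
    let qout :=
      (if qm8 ≠ 0 then PySem.List.slice qm none (some 8)
       else (PySem.List.slice qm none (some 8)).map (fun v => 1 - v)) ++ (qm ++ [1 - qm8]).drop 8
    let cnt_diff := if qm8 = 0 then N0_qm - N1_qm else N1_qm - N0_qm
    (binarray_to_uint qout, cnt_diff)
  else
    if (cnt > 0 ∧ N1_qm > 4) ∨ (cnt < 0 ∧ N1_qm < 4) then
      let qout := (PySem.List.slice qm none (some 8)).map (fun v => 1 - v) ++ (qm ++ [1]).drop 8
      (binarray_to_uint qout, 2 * PySem.List.pyGetD qm 8 0 + N0_qm - N1_qm)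
    else
      (binarray_to_uint (qm ++ [0]), -2 * (1 - PySem.List.pyGetD qm 8 0) + N1_qm - N0_qm)

-- ===== PORT B =====

-- sum(int(c) for c in bin(pix)[2:]) for pix ≥ 0 (on Pre_): digit sum of the binary string,
-- fuel-structural over the halving recursion
def pvBitSum (fuel : Nat) (n : Nat) : Nat :=
  match fuel with
  | 0 => 0
  | f + 1 => if n = 0 then 0 else n % 2 + pvBitSum f (n / 2)

def TMDS_pixel_cntdiff_alt (pix : Int) (cnt : Int) : Int × Int :=
  let N1_D : Int := (pvBitSum pix.toNat pix.toNat : Nat)   -- sum(int(c) for c in bin(pix)[2:])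
  let x0 := PySem.Int.band pix 255
  let x1 := PySem.Int.bxor x0 (PySem.Int.band (x0 <<< 1) 255)
  let x2 := PySem.Int.bxor x1 (PySem.Int.band (x1 <<< 2) 255)
  let x := PySem.Int.bxor x2 (PySem.Int.band (x2 <<< 4) 255)
  let qq :=
    if N1_D > 4 ∨ (N1_D = 4 ∧ PySem.Int.band pix 1 = 0) then ((0 : Int), PySem.Int.bxor x 170)
    else (1, x)
  let qm8 := qq.1
  let qm := qq.2
  let N1_qm : Int := (PySem.Int.bitCount qm : Nat)   -- bin(qm).count('1')
  let N0_qm : Int := 8 - N1_qm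
  let r :=
    if cnt = 0 ∨ N1_qm = 4 then
      (1 - qm8, if qm8 ≠ 0 then qm else PySem.Int.bxor qm 255,
        if qm8 ≠ 0 then N1_qm - N0_qm else N0_qm - N1_qm)
    else
      if (cnt > 0 ∧ N1_qm > 4) ∨ (cnt < 0 ∧ N1_qm < 4) then
        (1, PySem.Int.bxor qm 255, 2 * qm8 + N0_qm - N1_qm)
      else (0, qm, -2 * (1 - qm8) + N1_qm - N0_qm)
  (PySem.Int.bor (PySem.Int.bor r.2.1 (qm8 <<< 8)) (r.1 <<< 9), r.2.2)

-- ===== PRECONDITION & SPEC =====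

-- Pre_ excludes pix < 0, where both programs raise ValueError (int() applied to the 'b' of bin's '-0b…' prefix).
def Pre_TMDS_pixel_cntdiff (pix : Int) (cnt : Int) : Prop := 0 ≤ pix
instance (pix : Int) (cnt : Int) : Decidable (Pre_TMDS_pixel_cntdiff pix cnt) := by
  unfold Pre_TMDS_pixel_cntdiff; infer_instance

def pvWitness_TMDS_pixel_cntdiff : Int × Int := (77, -1)

def Spec_TMDS_pixel_cntdiff (pix : Int) (cnt : Int) (out : Int × Int) : Prop := out = TMDS_pixel_cntdiff_alt pix cnt
instance (pix : Int) (cnt : Int) (out : Int × Int) : Decidable (Spec_TMDS_pixel_cntdiff pix cnt out) := by unfold Spec_TMDS_pixel_cntdiff; infer_instance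

-- ===== CLAIM (what is proved, stated in full; the proofs are below) =====
def Claim_equal_TMDS_pixel_cntdiff : Prop := ∀ (pix : Int) (cnt : Int), Dom_TMDS_pixel_cntdiff pix cnt → Pre_TMDS_pixel_cntdiff pix cnt → Spec_TMDS_pixel_cntdiff pix cnt (TMDS_pixel_cntdiff pix cnt)

-- ===== LEMMAS AND PROOFS =====

-- the XNOR chain written out (proof-side helper; mirrors qmXnorA step for step)
def chainXnor (b0 b1 b2 b3 b4 b5 b6 b7 : Int) : List Int :=
  let q0 := b0
  let q1 := 1 - PySem.Int.bxor q0 b1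
  let q2 := 1 - PySem.Int.bxor q1 b2
  let q3 := 1 - PySem.Int.bxor q2 b3
  let q4 := 1 - PySem.Int.bxor q3 b4
  let q5 := 1 - PySem.Int.bxor q4 b5
  let q6 := 1 - PySem.Int.bxor q5 b6
  let q7 := 1 - PySem.Int.bxor q6 b7
  [q0, q1, q2, q3, q4, q5, q6, q7]

-- the XOR chain written out
def chainXor (b0 b1 b2 b3 b4 b5 b6 b7 : Int) : List Int :=
  let q0 := b0
  let q1 := PySem.Int.bxor q0 b1
  let q2 := PySem.Int.bxor q1 b2
  let q3 := PySem.Int.bxor q2 b3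
  let q4 := PySem.Int.bxor q3 b4
  let q5 := PySem.Int.bxor q4 b5
  let q6 := PySem.Int.bxor q5 b6
  let q7 := PySem.Int.bxor q6 b7
  [q0, q1, q2, q3, q4, q5, q6, q7]

-- binarray_to_uint as a plain fold (proof-side helper)
def listValA (l : List Int) : Int := l.reverse.foldl (fun a b => 2 * a + b) 0

-- A's computation after the D-dependent steps, as a function of the low byte m, the
-- XNOR/XOR selector p and cnt (proof-side helper; each piece is proved equal to A's).
def coreA (m : Nat) (p : Bool) (cnt : Int) : Int × Int :=
  let b0 : Int := ((m >>> 0 % 2 : Nat) : Int)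
  let b1 : Int := ((m >>> 1 % 2 : Nat) : Int)
  let b2 : Int := ((m >>> 2 % 2 : Nat) : Int)
  let b3 : Int := ((m >>> 3 % 2 : Nat) : Int)
  let b4 : Int := ((m >>> 4 % 2 : Nat) : Int)
  let b5 : Int := ((m >>> 5 % 2 : Nat) : Int)
  let b6 : Int := ((m >>> 6 % 2 : Nat) : Int)
  let b7 : Int := ((m >>> 7 % 2 : Nat) : Int)
  let qm := if p then chainXnor b0 b1 b2 b3 b4 b5 b6 b7 ++ [0]
            else chainXor b0 b1 b2 b3 b4 b5 b6 b7 ++ [1]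
  let N1_qm : Int := ((qm.take 8).count 1 : Nat)
  let N0_qm : Int := 8 - N1_qm
  if cnt = 0 ∨ N1_qm = 4 then
    let qm8 := qm.getD 8 0
    let qout :=
      (if qm8 ≠ 0 then qm.take 8
       else (qm.take 8).map (fun v => 1 - v)) ++ (qm ++ [1 - qm8]).drop 8
    let cnt_diff := if qm8 = 0 then N0_qm - N1_qm else N1_qm - N0_qm
    (listValA qout, cnt_diff)
  else
    if (cnt > 0 ∧ N1_qm > 4) ∨ (cnt < 0 ∧ N1_qm < 4) then
      let qout := (qm.take 8).map (fun v => 1 - v) ++ (qm ++ [1]).drop 8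
      (listValA qout, 2 * qm.getD 8 0 + N0_qm - N1_qm)
    else
      (listValA (qm ++ [0]), -2 * (1 - qm.getD 8 0) + N1_qm - N0_qm)

-- B's computation as a function of the low byte m, the selector p and cnt.
def coreB (m : Nat) (p : Bool) (cnt : Int) : Int × Int :=
  let x0 : Int := (m : Int)
  let x1 := PySem.Int.bxor x0 (PySem.Int.band (x0 <<< 1) 255)
  let x2 := PySem.Int.bxor x1 (PySem.Int.band (x1 <<< 2) 255)
  let x := PySem.Int.bxor x2 (PySem.Int.band (x2 <<< 4) 255)
  let qq := if p then ((0 : Int), PySem.Int.bxor x 170) else (1, x)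
  let qm8 := qq.1
  let qm := qq.2
  let N1_qm : Int := (PySem.Int.bitCount qm : Nat)
  let N0_qm : Int := 8 - N1_qm
  let r :=
    if cnt = 0 ∨ N1_qm = 4 then
      (1 - qm8, if qm8 ≠ 0 then qm else PySem.Int.bxor qm 255,
        if qm8 ≠ 0 then N1_qm - N0_qm else N0_qm - N1_qm)
    else
      if (cnt > 0 ∧ N1_qm > 4) ∨ (cnt < 0 ∧ N1_qm < 4) then
        (1, PySem.Int.bxor qm 255, 2 * qm8 + N0_qm - N1_qm)
      else (0, qm, -2 * (1 - qm8) + N1_qm - N0_qm)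
  (PySem.Int.bor (PySem.Int.bor r.2.1 (qm8 <<< 8)) (r.1 <<< 9), r.2.2)

theorem pvBits_getD : ∀ (f : Nat), ∀ (n k : Nat), n ≤ f →
    (pvBits f n).getD k 0 = ((n >>> k % 2 : Nat) : Int) := by
  intro f
  induction f with
  | zero =>
    intro n k h
    have hn : n = 0 := by omega
    subst hn; simp [pvBits]
  | succ f ih =>
    intro n k h
    by_cases hn : n = 0
    · subst hn; simp [pvBits]
    · simp only [pvBits, hn, if_false]
      cases k with
      | zero => simp
      | succ k =>
        have h2 : n / 2 ≤ f := by omega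
        have e : n >>> (k + 1) = (n / 2) >>> k := by
          rw [Nat.add_comm k 1, Nat.shiftRight_add, Nat.shiftRight_one]
        simp only [List.getD_cons_succ]
        rw [ih (n / 2) k h2, e]

theorem pvBits_high : ∀ (f : Nat), ∀ (n k : Nat), n ≤ f →
    (pvBits f n).length ≤ k → n >>> k = 0 := by
  intro f
  induction f with
  | zero =>
    intro n k h _
    have hn : n = 0 := by omega
    subst hn
    simp
  | succ f ih =>
    intro n k h hl
    by_cases hn : n = 0
    · subst hn; simp
    · simp only [pvBits, hn, if_false, List.length_cons] at hl
      obtain ⟨k', rfl⟩ : ∃ k', k = k' + 1 := ⟨k - 1, by omega⟩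
      have := ih (n / 2) k' (by omega) (by omega)
      have e : n >>> (k' + 1) = (n / 2) >>> k' := by
        rw [Nat.add_comm k' 1, Nat.shiftRight_add, Nat.shiftRight_one]
      omega

theorem pvBits_count : ∀ (f : Nat), ∀ (n : Nat), n ≤ f →
    (pvBits f n).count 1 = PySem.Int.bitCount (n : Int) := by
  intro f
  induction f with
  | zero =>
    intro n h
    have : n = 0 := by omega
    subst this; simp [pvBits, PySem.Int.bitCount_zero]
  | succ f ih =>
    intro n h
    by_cases hn : n = 0
    · subst hn; simp [pvBits, PySem.Int.bitCount_zero]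
    · simp only [pvBits, hn, if_false, List.count_cons]
      rw [ih (n / 2) (by omega)]
      rw [PySem.Int.bitCount_natCast (m := n) (by omega)]
      rcases Nat.mod_two_eq_zero_or_one n with h2 | h2 <;>
        simp [h2] <;> omega

theorem pvBitSum_count : ∀ (f : Nat), ∀ (n : Nat), n ≤ f →
    pvBitSum f n = PySem.Int.bitCount (n : Int) := by
  intro f
  induction f with
  | zero =>
    intro n h
    have : n = 0 := by omega
    subst this; simp [pvBitSum, PySem.Int.bitCount_zero]
  | succ f ih =>
    intro n h
    by_cases hn : n = 0
    · subst hn; simp [pvBitSum, PySem.Int.bitCount_zero]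
    · simp only [pvBitSum, hn, if_false]
      rw [ih (n / 2) (by omega), PySem.Int.bitCount_natCast (m := n) (by omega)]

theorem u8_count (n : Nat) : (uint8_to_binarray (n : Int)).count 1 = PySem.Int.bitCount (n : Int) := by
  unfold uint8_to_binarray
  by_cases hn : n = 0
  · subst hn; simp [PySem.Int.bitCount_zero]
  · simp only [Int.toNat_natCast, hn, if_false, List.count_append]
    rw [pvBits_count n n le_rfl]
    simp [List.count_replicate]

theorem u8_length (n : Nat) : 8 ≤ (uint8_to_binarray (n : Int)).length := by
  unfold uint8_to_binarray
  by_cases hn : n = 0 <;> simp [hn] <;> omega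

theorem u8_getD_nat (n k : Nat) (h8 : k < 8) :
    (uint8_to_binarray (n : Int)).getD k 0 = ((n >>> k % 2 : Nat) : Int) := by
  by_cases hn : n = 0
  · subst hn
    have e : uint8_to_binarray ((0 : Nat) : Int) = List.replicate 8 0 := by decide
    rw [e, List.getD_replicate _ h8]
    simp
  · have e : uint8_to_binarray ((n : Nat) : Int)
        = pvBits n n ++ List.replicate (8 - (pvBits n n).length) 0 := by
      simp [uint8_to_binarray, hn]
    rw [e]
    by_cases hk : k < (pvBits n n).length
    · rw [List.getD_append _ _ _ _ hk, pvBits_getD n n k le_rfl]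
    · rw [List.getD_append_right _ _ _ _ (by omega)]
      have hz : n >>> k = 0 := pvBits_high n n k le_rfl (by omega)
      rcases Nat.lt_or_ge (k - (pvBits n n).length) (8 - (pvBits n n).length) with hr | hr
      · rw [List.getD_replicate _ hr, hz]; simp
      · rw [List.getD_eq_default _ _ (by simp; omega), hz]; simp

theorem u8_getD (n : Nat) (i : Int) (h0 : 0 ≤ i) (h8 : i < 8) :
    PySem.List.pyGetD (uint8_to_binarray (n : Int)) i 0 = ((n >>> i.toNat % 2 : Nat) : Int) := by
  have hlen := u8_length n
  rw [PySem.List.pyGetD_eq_getElem _ _ h0 (by exact_mod_cast (by omega : i < (8:Int)).trans_le (by exact_mod_cast hlen))]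
  rw [List.getElem_eq_getD]
  exact u8_getD_nat n i.toNat (by omega)

theorem bit_mod256 (n k : Nat) (h : k < 8) : (n % 256) >>> k % 2 = n >>> k % 2 := by
  have e : n >>> k = n / 2 ^ k := Nat.shiftRight_eq_div_pow n k
  have e2 : (n % 256) >>> k = (n % 256) / 2 ^ k := Nat.shiftRight_eq_div_pow _ k
  interval_cases k <;> simp [e, e2] <;> omega

theorem qmXnorA_chain (D : List Int) :
    qmXnorA D = chainXnor (PySem.List.pyGetD D 0 0) (PySem.List.pyGetD D 1 0)
      (PySem.List.pyGetD D 2 0) (PySem.List.pyGetD D 3 0) (PySem.List.pyGetD D 4 0)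
      (PySem.List.pyGetD D 5 0) (PySem.List.pyGetD D 6 0) (PySem.List.pyGetD D 7 0) := by
  have hr : PySem.List.pyRange 1 8 1 = [1, 2, 3, 4, 5, 6, 7] := by decide
  unfold qmXnorA chainXnor
  rw [hr]
  norm_num only [List.foldl_cons, List.foldl_nil, List.cons_append, List.nil_append,
    PySem.List.pyGetD_ofNat', List.getD_cons_zero, List.getD_cons_succ]

theorem qmXorA_chain (D : List Int) :
    qmXorA D = chainXor (PySem.List.pyGetD D 0 0) (PySem.List.pyGetD D 1 0)
      (PySem.List.pyGetD D 2 0) (PySem.List.pyGetD D 3 0) (PySem.List.pyGetD D 4 0)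
      (PySem.List.pyGetD D 5 0) (PySem.List.pyGetD D 6 0) (PySem.List.pyGetD D 7 0) := by
  have hr : PySem.List.pyRange 1 8 1 = [1, 2, 3, 4, 5, 6, 7] := by decide
  unfold qmXorA chainXor
  rw [hr]
  norm_num only [List.foldl_cons, List.foldl_nil, List.cons_append, List.nil_append,
    PySem.List.pyGetD_ofNat', List.getD_cons_zero, List.getD_cons_succ]

theorem b2u_eq (l : List Int) : binarray_to_uint l = listValA l := by
  unfold binarray_to_uint listValA
  rw [PySem.List.slice?_none_none_neg_one]
  simp only [Option.getD_some]
  have hlen : PySem.List.len l = ((l.reverse).length : Int) := by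
    simp [PySem.List.len_eq]
  rw [hlen,
    PySem.List.foldl_pyRange_pyGetD' l.reverse 0 (fun (a b : Int) => (a <<< 1) + b)
      (PySem.List.pyGetD l.reverse 0 0) (by norm_num)]
  have hf : (fun (a b : Int) => (a <<< 1) + b) = (fun a b => 2 * a + b) := by
    funext a b
    rw [show (1 : Int) = ((1 : Nat) : Int) from rfl, Int.shiftLeft_eq_mul_pow]
    ring
  cases hrev : l.reverse with
  | nil => simp [PySem.List.pyGetD_ofNat']
  | cons x t => rw [hf]; simp

theorem slice8 (xs : List Int) : PySem.List.slice xs none (some 8) = xs.take 8 := by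
  rw [PySem.List.slice_to xs (b := 8) (by norm_num),
      show ((8 : Int)).toNat = 8 from rfl]

theorem u8_bit (pix : Int) (h : 0 ≤ pix) (k : Nat) (hk : k < 8) :
    PySem.List.pyGetD (uint8_to_binarray pix) ((k : Nat) : Int) 0
      = (((pix.toNat % 256) >>> k % 2 : Nat) : Int) := by
  have hp : pix = ((pix.toNat : Nat) : Int) := by omega
  rw [hp, u8_getD _ _ (by omega) (by exact_mod_cast hk)]
  simp only [Int.toNat_natCast]
  rw [bit_mod256 _ _ hk]

theorem decompA (pix cnt : Int) (h : 0 ≤ pix) :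
    TMDS_pixel_cntdiff pix cnt
      = coreA (pix.toNat % 256)
          (decide ((uint8_to_binarray pix).count 1 > 4 ∨
            ((uint8_to_binarray pix).count 1 = 4 ∧ PySem.List.pyGetD (uint8_to_binarray pix) 0 0 = 0)))
          cnt := by
  have hb0 : PySem.List.pyGetD (uint8_to_binarray pix) 0 0 = (((pix.toNat % 256) >>> 0 % 2 : Nat) : Int) := by
    simpa using u8_bit pix h 0 (by norm_num)
  have hb1 : PySem.List.pyGetD (uint8_to_binarray pix) 1 0 = (((pix.toNat % 256) >>> 1 % 2 : Nat) : Int) := by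
    simpa using u8_bit pix h 1 (by norm_num)
  have hb2 : PySem.List.pyGetD (uint8_to_binarray pix) 2 0 = (((pix.toNat % 256) >>> 2 % 2 : Nat) : Int) := by
    simpa using u8_bit pix h 2 (by norm_num)
  have hb3 : PySem.List.pyGetD (uint8_to_binarray pix) 3 0 = (((pix.toNat % 256) >>> 3 % 2 : Nat) : Int) := by
    simpa using u8_bit pix h 3 (by norm_num)
  have hb4 : PySem.List.pyGetD (uint8_to_binarray pix) 4 0 = (((pix.toNat % 256) >>> 4 % 2 : Nat) : Int) := by
    simpa using u8_bit pix h 4 (by norm_num)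
  have hb5 : PySem.List.pyGetD (uint8_to_binarray pix) 5 0 = (((pix.toNat % 256) >>> 5 % 2 : Nat) : Int) := by
    simpa using u8_bit pix h 5 (by norm_num)
  have hb6 : PySem.List.pyGetD (uint8_to_binarray pix) 6 0 = (((pix.toNat % 256) >>> 6 % 2 : Nat) : Int) := by
    simpa using u8_bit pix h 6 (by norm_num)
  have hb7 : PySem.List.pyGetD (uint8_to_binarray pix) 7 0 = (((pix.toNat % 256) >>> 7 % 2 : Nat) : Int) := by
    simpa using u8_bit pix h 7 (by norm_num)
  simp only [TMDS_pixel_cntdiff, coreA, decide_eq_true_eq]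
  rw [qmXnorA_chain, qmXorA_chain, hb0, hb1, hb2, hb3, hb4, hb5, hb6, hb7]
  simp only [slice8, b2u_eq, PySem.List.pyGetD_ofNat']

theorem decompB (pix cnt : Int) (h : 0 ≤ pix) :
    TMDS_pixel_cntdiff_alt pix cnt
      = coreB (pix.toNat % 256)
          (decide ((uint8_to_binarray pix).count 1 > 4 ∨
            ((uint8_to_binarray pix).count 1 = 4 ∧ PySem.List.pyGetD (uint8_to_binarray pix) 0 0 = 0)))
          cnt := by
  have hp : pix = ((pix.toNat : Nat) : Int) := by omega
  have hband : PySem.Int.band pix 255 = ((pix.toNat % 256 : Nat) : Int) := by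
    rw [PySem.Int.band_of_nonneg h (by norm_num),
        show ((255:Int)).toNat = 2 ^ 8 - 1 from rfl, Nat.and_two_pow_sub_one_eq_mod]
  have hcount : ((uint8_to_binarray pix).count 1 : Nat) = pvBitSum pix.toNat pix.toNat := by
    rw [pvBitSum_count pix.toNat pix.toNat le_rfl]
    conv_lhs => rw [hp]
    rw [u8_count]
  have hbit0 : PySem.List.pyGetD (uint8_to_binarray pix) 0 0 = ((pix.toNat % 2 : Nat) : Int) := by
    rw [hp, u8_getD _ 0 (by norm_num) (by norm_num)]
    simp
  have hband1 : PySem.Int.band pix 1 = ((pix.toNat % 2 : Nat) : Int) := by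
    rw [PySem.Int.band_one, hp]
    exact_mod_cast PySem.Int.mod_natCast pix.toNat 2
  have hiff : (((pvBitSum pix.toNat pix.toNat : Nat) : Int) > 4 ∨
      (((pvBitSum pix.toNat pix.toNat : Nat) : Int) = 4 ∧ PySem.Int.band pix 1 = 0)) ↔
      ((uint8_to_binarray pix).count 1 > 4 ∨
        ((uint8_to_binarray pix).count 1 = 4 ∧ PySem.List.pyGetD (uint8_to_binarray pix) 0 0 = 0)) := by
    rw [hband1, hbit0, hcount]
    constructor <;> intro hc <;> rcases hc with hc | hc
    · exact Or.inl (by exact_mod_cast hc)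
    · exact Or.inr ⟨by exact_mod_cast hc.1, hc.2⟩
    · exact Or.inl (by exact_mod_cast hc)
    · exact Or.inr ⟨by exact_mod_cast hc.1, hc.2⟩
  simp only [TMDS_pixel_cntdiff_alt, coreB, decide_eq_true_eq]
  rw [hband]
  simp only [hiff]

theorem coreA_cnt (m : Nat) (p : Bool) (cnt c' : Int)
    (h0 : (cnt = 0) ↔ (c' = 0)) (hp : (cnt > 0) ↔ (c' > 0)) (hn : (cnt < 0) ↔ (c' < 0)) :
    coreA m p cnt = coreA m p c' := by
  simp only [coreA, h0, hp, hn]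

theorem coreB_cnt (m : Nat) (p : Bool) (cnt c' : Int)
    (h0 : (cnt = 0) ↔ (c' = 0)) (hp : (cnt > 0) ↔ (c' > 0)) (hn : (cnt < 0) ↔ (c' < 0)) :
    coreB m p cnt = coreB m p c' := by
  simp only [coreB, h0, hp, hn]

set_option maxRecDepth 100000 in
set_option maxHeartbeats 4000000 in
theorem main256 : ∀ (m : Fin 256) (p : Bool),
    coreA m p 0 = coreB m p 0 ∧ coreA m p 1 = coreB m p 1 ∧ coreA m p (-1) = coreB m p (-1) := by
  decide

-- ===== VERDICT (by name: the statement is the Claim_ definition above) =====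
theorem TMDS_pixel_cntdiff_spec : Claim_equal_TMDS_pixel_cntdiff := by
  intro pix cnt _ hpre
  unfold Spec_TMDS_pixel_cntdiff
  rw [decompA pix cnt hpre, decompB pix cnt hpre]
  set p := decide ((uint8_to_binarray pix).count 1 > 4 ∨
    ((uint8_to_binarray pix).count 1 = 4 ∧ PySem.List.pyGetD (uint8_to_binarray pix) 0 0 = 0)) with hpd
  have hm : pix.toNat % 256 < 256 := Nat.mod_lt _ (by omega)
  have h := main256 ⟨pix.toNat % 256, hm⟩ p
  rcases lt_trichotomy cnt 0 with hc | hc | hc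
  · rw [coreA_cnt _ p cnt (-1) (by omega) (by omega) (by omega),
        coreB_cnt _ p cnt (-1) (by omega) (by omega) (by omega)]
    exact h.2.2
  · rw [coreA_cnt _ p cnt 0 (by omega) (by omega) (by omega),
        coreB_cnt _ p cnt 0 (by omega) (by omega) (by omega)]
    exact h.1
  · rw [coreA_cnt _ p cnt 1 (by omega) (by omega) (by omega),
        coreB_cnt _ p cnt 1 (by omega) (by omega) (by omega)]
    exact h.2.1
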